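-- pv_equiv track=rewrite | github.com/svend4/infom | signatures/hexsig.py | is_perfect_code
-- ===== SOURCE A (Python) =====
-- N_NODES   = 64    # 2^6 вершин
--
-- def hamming(a: int, b: int) -> int:
--     return bin(a ^ b).count('1')
--
-- def hamming_ball(center: int, radius: int) -> list[int]:
--     return [h for h in range(N_NODES) if hamming(center, h) <= radius]
--
-- def is_perfect_code(centers: list[int], radius: int) -> bool:
--     """Идеальная упаковка: шары не пересекаются и покрывают весь Q6."""
--     all_nodes = set()
--     for c in centers:
--         ball = set(hamming_ball(c, radius))
--         if ball & all_nodes: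
--             return False
--         all_nodes |= ball
--     return len(all_nodes) == N_NODES
-- ===== SOURCE B (Python) =====
-- N_NODES = 64  # 2^6 vertices of Q6
--
--
-- def hamming(a: int, b: int) -> int:
--     return bin(a ^ b).count('1')
--
--
-- def is_perfect_code(centers: list[int], radius: int) -> bool:
--     """Perfect packing iff every node of Q6 is covered by exactly one ball."""
--     return all(
--         sum(1 for c in centers if hamming(c, h) <= radius) == 1
--         for h in range(N_NODES)
--     )
-- ===== Notes on version B (the rewrite author's own statement) =====
-- stated objective: alternative
-- what changed: Inverts the traversal: instead of A's incremental union of ball sets with an early-exit overlap test and a final cardinality check, B counts for each of the 64 nodes how many centers' balls cover it and returns True iff every count is exactly 1.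
import Mathlib
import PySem

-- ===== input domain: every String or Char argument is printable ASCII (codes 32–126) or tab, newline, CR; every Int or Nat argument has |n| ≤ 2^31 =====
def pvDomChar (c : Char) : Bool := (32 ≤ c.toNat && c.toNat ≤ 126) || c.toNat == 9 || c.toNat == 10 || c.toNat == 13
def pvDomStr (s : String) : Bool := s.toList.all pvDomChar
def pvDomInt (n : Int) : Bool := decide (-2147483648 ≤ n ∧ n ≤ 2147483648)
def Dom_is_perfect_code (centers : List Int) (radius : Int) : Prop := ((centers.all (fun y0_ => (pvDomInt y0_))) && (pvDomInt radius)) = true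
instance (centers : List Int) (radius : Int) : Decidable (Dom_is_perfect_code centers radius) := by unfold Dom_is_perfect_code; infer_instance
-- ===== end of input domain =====

-- B re-states "perfect packing" as "every node of Q6 is covered by exactly one center's
-- ball" (one count per node) instead of A's incremental set union with an overlap test;
-- objective: alternative decomposition, not claimed faster.

-- ===== PORT A =====
-- hamming(a, b) = bin(a ^ b).count('1'): count of '1' characters in bin(a ^ b) (exact, incl. negatives)
def hamming (a b : Int) : Int :=
  ((PySem.Str.count (PySem.Int.pyBin (PySem.Int.bxor a b)) "1" : Nat) : Int)

def hamming_ball (center : Int) (radius : Int) : List Int :=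
  (PySem.List.pyRange 0 64 1).filter (fun h => decide (hamming center h ≤ radius))

-- the 'for c in centers' loop of A, carrying the set all_nodes; early return False on overlap
def ipcLoop (radius : Int) : List Int → PySem.Set Int → Bool
  | [], all_nodes => decide ((all_nodes.length : Int) = 64)          -- len(all_nodes) == N_NODES
  | c :: rest, all_nodes =>
      let ball : PySem.Set Int := PySem.Set.ofList (hamming_ball c radius)
      if PySem.Set.inter ball all_nodes = [] then                    -- 'if ball & all_nodes: return False'
        ipcLoop radius rest (PySem.Set.union all_nodes ball)         -- 'all_nodes |= ball'
      else false

def is_perfect_code (centers : List Int) (radius : Int) : Bool :=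
  ipcLoop radius centers PySem.Set.empty

-- ===== PORT B =====
def is_perfect_code_alt (centers : List Int) (radius : Int) : Bool :=
  (PySem.List.pyRange 0 64 1).all (fun h =>
    decide ((centers.foldl (fun acc c => if hamming c h ≤ radius then acc + 1 else acc) (0 : Int)) = 1))

-- ===== PRECONDITION & SPEC =====
def Spec_is_perfect_code (centers : List Int) (radius : Int) (out : Bool) : Prop := out = is_perfect_code_alt centers radius
instance (centers : List Int) (radius : Int) (out : Bool) : Decidable (Spec_is_perfect_code centers radius out) := by unfold Spec_is_perfect_code; infer_instance

-- ===== CLAIM (what is proved, stated in full; the proofs are below) =====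
def Claim_equal_is_perfect_code : Prop := ∀ (centers : List Int) (radius : Int), Dom_is_perfect_code centers radius → Spec_is_perfect_code centers radius (is_perfect_code centers radius)

-- ===== LEMMAS AND PROOFS =====

-- number of centers in cs whose ball covers node h
def coverCnt (radius : Int) (cs : List Int) (h : Int) : Nat :=
  cs.countP (fun c => decide (hamming c h ≤ radius))

theorem mem_ball_iff (c radius x : Int) :
    x ∈ PySem.Set.ofList (hamming_ball c radius) ↔ x ∈ PySem.List.pyRange 0 64 1 ∧ hamming c x ≤ radius := by
  rw [PySem.Set.mem_ofList]
  simp [hamming_ball, List.mem_filter]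

-- cover count of a node h against c :: rest splits off c's contribution
theorem coverCnt_cons (radius c : Int) (rest : List Int) (h : Int) :
    coverCnt radius (c :: rest) h =
      (if hamming c h ≤ radius then 1 else 0) + coverCnt radius rest h := by
  unfold coverCnt
  rw [List.countP_cons]
  by_cases hb : hamming c h ≤ radius
  · simp [hb]
    omega
  · simp [hb]

-- the loop invariant: ipcLoop returns true iff every node is either already in the
-- accumulated set and covered by no remaining center, or not yet in it and covered exactly once
theorem ipcLoop_iff (radius : Int) (cs : List Int) (S : PySem.Set Int)
    (hnd : List.Nodup S) (hsub : ∀ x ∈ S, x ∈ PySem.List.pyRange 0 64 1) :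
    ipcLoop radius cs S = true ↔
      ∀ h ∈ PySem.List.pyRange 0 64 1,
        (h ∈ S ∧ coverCnt radius cs h = 0) ∨ (h ∉ S ∧ coverCnt radius cs h = 1) := by
  induction cs generalizing S with
  | nil =>
      simp only [ipcLoop, decide_eq_true_eq]
      constructor
      · intro hlen h hh
        have h64 : S.length = 64 := by omega
        have hsp : S.Subperm (PySem.List.pyRange 0 64 1) := List.subperm_of_subset hnd hsub
        have hperm : S.Perm (PySem.List.pyRange 0 64 1) :=
          hsp.perm_of_length_le (by simp [PySem.List.length_pyRange_one, h64])
        exact Or.inl ⟨(hperm.mem_iff).mpr hh, by simp [coverCnt]⟩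
      · intro hall
        have hsS : ∀ x ∈ PySem.List.pyRange 0 64 1, x ∈ S := by
          intro x hx
          rcases hall x hx with ⟨hm, _⟩ | ⟨hm, hc⟩
          · exact hm
          · simp [coverCnt] at hc
        have hperm : S.Perm (PySem.List.pyRange 0 64 1) :=
          (List.subperm_of_subset hnd hsub).perm_of_length_le
            (List.Subperm.length_le
              (List.subperm_of_subset (PySem.List.nodup_pyRange_one 0 64) hsS))
        have := hperm.length_eq
        simp only [PySem.List.length_pyRange_one] at this
        omega
  | cons c rest ih =>
      simp only [ipcLoop]
      by_cases hint : PySem.Set.inter (PySem.Set.ofList (hamming_ball c radius)) S = []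
      · rw [if_pos hint]
        have hnd' : List.Nodup (PySem.Set.union S (PySem.Set.ofList (hamming_ball c radius))) :=
          PySem.Set.nodup_union _ _ hnd
        have hsub' : ∀ x ∈ PySem.Set.union S (PySem.Set.ofList (hamming_ball c radius)),
            x ∈ PySem.List.pyRange 0 64 1 := by
          intro x hx
          rcases (PySem.Set.mem_union _ _ x).mp hx with hx | hx
          · exact hsub x hx
          · exact ((mem_ball_iff c radius x).mp hx).1
        rw [ih _ hnd' hsub']
        have hdisj : ∀ x, ¬(x ∈ S ∧ hamming c x ≤ radius) := by
          intro x ⟨hxS, hxb⟩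
          have hxr := hsub x hxS
          have hxi : x ∈ PySem.Set.inter (PySem.Set.ofList (hamming_ball c radius)) S :=
            (PySem.Set.mem_inter _ _ x).mpr ⟨(mem_ball_iff c radius x).mpr ⟨hxr, hxb⟩, hxS⟩
          rw [hint] at hxi
          exact absurd hxi (by simp)
        constructor
        · intro hall h hh
          rcases hall h hh with ⟨hm, hc0⟩ | ⟨hm, hc1⟩
          · rcases (PySem.Set.mem_union _ _ h).mp hm with hmS | hmb
            · have hmb : ¬ hamming c h ≤ radius := fun hb => hdisj h ⟨hmS, hb⟩
              rw [coverCnt_cons, if_neg hmb]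
              exact Or.inl ⟨hmS, by omega⟩
            · have hb := (mem_ball_iff c radius h).mp hmb
              have hmS : h ∉ S := fun hS => hdisj h ⟨hS, hb.2⟩
              rw [coverCnt_cons, if_pos hb.2]
              exact Or.inr ⟨hmS, by omega⟩
          · have hmS : h ∉ S := fun hS => hm ((PySem.Set.mem_union _ _ h).mpr (Or.inl hS))
            have hmb : ¬ hamming c h ≤ radius := fun hb =>
              hm ((PySem.Set.mem_union _ _ h).mpr (Or.inr ((mem_ball_iff c radius h).mpr ⟨hh, hb⟩)))
            rw [coverCnt_cons, if_neg hmb]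
            exact Or.inr ⟨hmS, by omega⟩
        · intro hall h hh
          rcases hall h hh with ⟨hm, hc0⟩ | ⟨hm, hc1⟩
          · have hmb : ¬ hamming c h ≤ radius := fun hb => hdisj h ⟨hm, hb⟩
            rw [coverCnt_cons, if_neg hmb] at hc0
            exact Or.inl ⟨(PySem.Set.mem_union _ _ h).mpr (Or.inl hm), by omega⟩
          · by_cases hb : hamming c h ≤ radius
            · rw [coverCnt_cons, if_pos hb] at hc1
              exact Or.inl ⟨(PySem.Set.mem_union _ _ h).mpr
                (Or.inr ((mem_ball_iff c radius h).mpr ⟨hh, hb⟩)), by omega⟩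
            · rw [coverCnt_cons, if_neg hb] at hc1
              refine Or.inr ⟨?_, by omega⟩
              intro hm'
              rcases (PySem.Set.mem_union _ _ h).mp hm' with hS | hball
              · exact hm hS
              · exact hb ((mem_ball_iff c radius h).mp hball).2
      · rw [if_neg hint]
        simp only [Bool.false_eq_true, false_iff]
        intro hall
        apply hint
        rw [List.eq_nil_iff_forall_not_mem]
        intro x hx
        have hx' := (PySem.Set.mem_inter _ _ x).mp hx
        have hxb := (mem_ball_iff c radius x).mp hx'.1
        rcases hall x hxb.1 with ⟨_, hc0⟩ | ⟨hm, _⟩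
        · rw [coverCnt_cons, if_pos hxb.2] at hc0
          omega
        · exact hm hx'.2

theorem is_perfect_code_spec : Claim_equal_is_perfect_code := by
  intro centers radius _
  unfold Spec_is_perfect_code
  rw [Bool.eq_iff_iff]
  unfold is_perfect_code is_perfect_code_alt
  rw [ipcLoop_iff radius centers PySem.Set.empty List.nodup_nil (by intro x hx; cases hx)]
  rw [List.all_eq_true]
  constructor
  · intro hall h hh
    rcases hall h hh with ⟨hm, _⟩ | ⟨_, hc1⟩
    · simp [PySem.Set.empty] at hm
    · rw [PySem.List.foldl_ite_add_one (fun c => hamming c h ≤ radius)]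
      simp only [decide_eq_true_eq]
      unfold coverCnt at hc1
      omega
  · intro hall h hh
    have := hall h hh
    rw [PySem.List.foldl_ite_add_one (fun c => hamming c h ≤ radius)] at this
    simp only [decide_eq_true_eq] at this
    right
    refine ⟨fun hm => (by simp [PySem.Set.empty] at hm), ?_⟩
    unfold coverCnt
    omega
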